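-- pv_equiv track=rewrite | github.com/tjp2021/zenslap | migration_manager.py | _parse_migration_steps
-- ===== SOURCE A (Python) =====
-- from typing import Dict, List, Optional, Tuple
--
-- def _parse_migration_steps(migration_sql: str) -> List[Tuple[str, str]]:
--     """Parse migration SQL into ordered steps based on our template."""
--     steps = []
--     current_step = []
--     current_step_name = None
--
--     for line in migration_sql.split('\n'):
--         if line.strip().startswith('-- Step'):
--             if current_step_name:
--                 steps.append((current_step_name, '\n'.join(current_step)))
--             current_step = []
--             current_step_name = line.strip()
--         else:
--             current_step.append(line)
--
--     if current_step_name: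
--         steps.append((current_step_name, '\n'.join(current_step)))
--
--     return steps
-- ===== SOURCE B (Python) =====
-- from typing import List, Tuple
--
-- def _parse_migration_steps(migration_sql: str) -> List[Tuple[str, str]]:
--     """Parse migration SQL into ordered steps based on our template."""
--     lines = migration_sql.split('\n')
--     idxs = [i for i, line in enumerate(lines) if line.strip().startswith('-- Step')]
--     bounds = idxs[1:] + [len(lines)]
--     return [(lines[i].strip(), '\n'.join(lines[i + 1:b]))
--             for i, b in zip(idxs, bounds)]
-- ===== Notes on version B (the rewrite author's own statement) =====
-- stated objective: alternative
-- what changed: Replaced A's stateful single-pass accumulator (current step name/body carried through the loop with flushes) by a two-pass boundary-then-slice decomposition: collect the header line indices once, then build each step by slicing the lines between consecutive headers.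
import Mathlib
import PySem

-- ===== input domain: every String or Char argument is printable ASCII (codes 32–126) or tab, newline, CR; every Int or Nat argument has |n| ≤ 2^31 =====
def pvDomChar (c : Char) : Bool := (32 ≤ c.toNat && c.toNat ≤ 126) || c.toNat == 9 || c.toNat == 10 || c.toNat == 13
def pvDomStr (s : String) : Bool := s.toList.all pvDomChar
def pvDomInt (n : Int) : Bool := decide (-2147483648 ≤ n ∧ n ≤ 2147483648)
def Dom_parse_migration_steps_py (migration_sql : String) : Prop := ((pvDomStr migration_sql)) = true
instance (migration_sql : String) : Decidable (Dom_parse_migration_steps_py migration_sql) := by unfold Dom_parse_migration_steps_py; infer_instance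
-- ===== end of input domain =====

-- B replaces A's stateful single-pass accumulator by a two-pass boundary-then-slice
-- decomposition (collect header indices once, then slice each body); objective: alternative.

-- ===== PORT A =====

-- '-- Step' header test, shared by both Python versions (line.strip().startswith('-- Step'))
def pmsIsHdr (l : String) : Bool := PySem.Str.startswith (PySem.Str.strip l) "-- Step"

-- Python's 'if current_step_name: steps.append((current_step_name, "\n".join(current_step)))'
-- (None and the empty string are falsy; the same code appears twice in A)
def pmsFlush (steps : List (String × String)) (name : Option String) (cur : List String) :
    List (String × String) :=
  match name with
  | some n => if n == "" then steps else steps ++ [(n, PySem.Str.join "\n" cur)]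
  | none => steps

-- the 'for line in migration_sql.split('\n')' loop of A, state = (steps, current_step, current_step_name)
def pmsLoop : List String → List (String × String) → List String → Option String →
    List (String × String)
  | [], steps, cur, name => pmsFlush steps name cur
  | l :: ls, steps, cur, name =>
    if pmsIsHdr l then
      pmsLoop ls (pmsFlush steps name cur) [] (some (PySem.Str.strip l))
    else
      pmsLoop ls steps (cur ++ [l]) name

-- migration_sql.split('\n'); the separator is nonempty, so split? is never none and .getD [] never fires
def parse_migration_steps_py (migration_sql : String) : List (String × String) :=
  pmsLoop ((PySem.Str.split? migration_sql "\n").getD []) [] [] none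

-- ===== PORT B =====

-- idxs = [i for i, line in enumerate(lines) if line.strip().startswith('-- Step')]
def pmsIdxs (lines : List String) : List Int :=
  (PySem.List.enumerate lines 0).filterMap (fun p => if pmsIsHdr p.2 then some p.1 else none)

-- [(lines[i].strip(), '\n'.join(lines[i+1:b])) for i, b in zip(idxs, idxs[1:] + [len(lines)])]
-- (every i ∈ idxs is a valid index into lines, so the .getD default is never used)
def pmsBody (lines : List String) (idxs : List Int) : List (String × String) :=
  (idxs.zip (idxs.drop 1 ++ [(lines.length : Int)])).map
    (fun p => (PySem.Str.strip ((PySem.List.pyGet? lines p.1).getD ""),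
               PySem.Str.join "\n" (PySem.List.slice lines (some (p.1 + 1)) (some p.2))))

def parse_migration_steps_py_alt (migration_sql : String) : List (String × String) :=
  let lines := (PySem.Str.split? migration_sql "\n").getD []
  pmsBody lines (pmsIdxs lines)

-- ===== PRECONDITION & SPEC =====
def Spec_parse_migration_steps_py (migration_sql : String) (out : List (String × String)) : Prop := out = parse_migration_steps_py_alt migration_sql
instance (migration_sql : String) (out : List (String × String)) : Decidable (Spec_parse_migration_steps_py migration_sql out) := by unfold Spec_parse_migration_steps_py; infer_instance

-- ===== CLAIM (what is proved, stated in full; the proofs are below) =====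
def Claim_equal_parse_migration_steps_py : Prop := ∀ (migration_sql : String), Dom_parse_migration_steps_py migration_sql → Spec_parse_migration_steps_py migration_sql (parse_migration_steps_py migration_sql)

-- ===== LEMMAS AND PROOFS =====

-- common reference: recursion on the first header / the run of non-header lines
def pmsGroups : List String → List (String × String)
  | [] => []
  | l :: ls =>
    if pmsIsHdr l then
      (PySem.Str.strip l,
        PySem.Str.join "\n" (ls.takeWhile (fun x => !pmsIsHdr x)))
        :: pmsGroups (ls.dropWhile (fun x => !pmsIsHdr x))
    else pmsGroups ls
termination_by ls => ls.length
decreasing_by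
  · have := List.length_dropWhile_le (p := fun x => !pmsIsHdr x) (l := ls); simp; omega
  · simp

-- Nat-indexed mirror of B's two passes
def pmsNatIdxs : List String → List Nat
  | [] => []
  | l :: ls => (if pmsIsHdr l then [0] else []) ++ (pmsNatIdxs ls).map (· + 1)

def pmsNatBody (lines : List String) (idxs : List Nat) : List (String × String) :=
  (idxs.zip (idxs.drop 1 ++ [lines.length])).map
    (fun p => (PySem.Str.strip (lines.getD p.1 ""),
               PySem.Str.join "\n" ((lines.drop (p.1 + 1)).take (p.2 - (p.1 + 1)))))

lemma pmsIsHdr_ne_empty {l : String} (h : pmsIsHdr l = true) : PySem.Str.strip l ≠ "" := by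
  intro he
  rw [pmsIsHdr, he] at h
  simp [PySem.Str.startswith, PySem.Chars.startswith] at h

lemma pmsFlush_out (steps : List (String × String)) (name : Option String) (cur : List String) :
    pmsFlush steps name cur = steps ++ pmsFlush [] name cur := by
  cases name with
  | none => simp [pmsFlush]
  | some n => by_cases h : n == "" <;> simp [pmsFlush, h]

lemma pmsLoop_out (ls : List String) :
    ∀ steps cur name, pmsLoop ls steps cur name = steps ++ pmsLoop ls [] cur name := by
  induction ls with
  | nil => intro steps cur name; simpa [pmsLoop] using pmsFlush_out steps name cur
  | cons l ls ih =>
    intro steps cur name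
    by_cases h : pmsIsHdr l
    · rw [pmsLoop, pmsLoop, if_pos h, if_pos h, ih, ih (pmsFlush [] name cur),
        pmsFlush_out, List.append_assoc]
    · rw [pmsLoop, pmsLoop, if_neg h, if_neg h, ih]

lemma pmsGroups_dropWhile (ls : List String) :
    pmsGroups (ls.dropWhile (fun x => !pmsIsHdr x)) = pmsGroups ls := by
  induction ls with
  | nil => simp
  | cons l ls ih =>
    by_cases h : pmsIsHdr l
    · simp [List.dropWhile_cons, h]
    · rw [List.dropWhile_cons]
      simp only [h, Bool.not_false, if_true]
      rw [ih, pmsGroups, if_neg h]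

lemma pmsLoop_some (ls : List String) :
    ∀ cur n, n ≠ "" →
      pmsLoop ls [] cur (some n) =
        (n, PySem.Str.join "\n" (cur ++ ls.takeWhile (fun x => !pmsIsHdr x)))
          :: pmsGroups (ls.dropWhile (fun x => !pmsIsHdr x)) := by
  induction ls with
  | nil =>
    intro cur n hn
    simp [pmsLoop, pmsFlush, hn, pmsGroups]
  | cons l ls ih =>
    intro cur n hn
    by_cases h : pmsIsHdr l
    · rw [pmsLoop, if_pos h, pmsLoop_out]
      have hflush : pmsFlush [] (some n) cur = [(n, PySem.Str.join "\n" cur)] := by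
        simp [pmsFlush, hn]
      rw [hflush, ih [] (PySem.Str.strip l) (pmsIsHdr_ne_empty h)]
      simp [List.takeWhile_cons, List.dropWhile_cons, h, pmsGroups]
    · rw [pmsLoop, if_neg h, ih (cur ++ [l]) n hn]
      simp [List.takeWhile_cons, List.dropWhile_cons, h]

lemma pmsLoop_none (ls : List String) :
    ∀ cur, pmsLoop ls [] cur none = pmsGroups ls := by
  induction ls with
  | nil => intro cur; simp [pmsLoop, pmsFlush, pmsGroups]
  | cons l ls ih =>
    intro cur
    by_cases h : pmsIsHdr l
    · rw [pmsLoop, if_pos h]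
      have : pmsFlush [] none cur = [] := rfl
      rw [this, pmsLoop_some ls [] (PySem.Str.strip l) (pmsIsHdr_ne_empty h)]
      simp [pmsGroups, h]
    · rw [pmsLoop, if_neg h, ih, pmsGroups, if_neg h]

-- B side: pmsIdxs is the Int cast of pmsNatIdxs
lemma pmsIdxs_shift (ls : List String) :
    ∀ s : Int, (PySem.List.enumerate ls (s + 1)).filterMap
        (fun p => if pmsIsHdr p.2 then some p.1 else none) =
      ((PySem.List.enumerate ls s).filterMap
        (fun p => if pmsIsHdr p.2 then some p.1 else none)).map (· + 1) := by
  induction ls with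
  | nil => intro s; simp [PySem.List.enumerate_nil]
  | cons l ls ih =>
    intro s
    rw [PySem.List.enumerate_cons, PySem.List.enumerate_cons, List.filterMap_cons,
      List.filterMap_cons]
    by_cases h : pmsIsHdr l
    · simp only [h, if_true, List.map_cons]
      rw [ih (s + 1)]
    · simp only [h, Bool.false_eq_true, if_false]
      rw [ih (s + 1)]

lemma pmsCastShift (js : List Nat) :
    (js.map (fun n : Nat => (n : Int))).map (fun i : Int => i + 1) =
      (js.map (fun n : Nat => n + 1)).map (fun n : Nat => (n : Int)) := by
  induction js with
  | nil => rfl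
  | cons a t ih =>
    simp only [List.map_cons, List.cons.injEq]
    exact ⟨by push_cast; ring, ih⟩

lemma pmsIdxs_eq_natCast (ls : List String) :
    pmsIdxs ls = (pmsNatIdxs ls).map (fun n : Nat => (n : Int)) := by
  induction ls with
  | nil => simp [pmsIdxs, pmsNatIdxs, PySem.List.enumerate_nil]
  | cons l ls ih =>
    rw [pmsIdxs, PySem.List.enumerate_cons, List.filterMap_cons]
    have hsh := pmsIdxs_shift ls 0
    rw [← pmsIdxs] at hsh
    by_cases h : pmsIsHdr l
    · simp only [h, if_true]
      rw [hsh, ih, pmsCastShift, pmsNatIdxs]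
      simp [h]
    · simp only [h, Bool.false_eq_true, if_false]
      rw [hsh, ih, pmsCastShift, pmsNatIdxs]
      simp [h]

lemma pmsBody_cons (lines : List String) (i : Int) (rest : List Int) :
    pmsBody lines (i :: rest) =
      (PySem.Str.strip ((PySem.List.pyGet? lines i).getD ""),
        PySem.Str.join "\n" (PySem.List.slice lines (some (i + 1))
          (some (rest.headD (lines.length : Int)))))
        :: pmsBody lines rest := by
  cases rest <;> simp [pmsBody]

lemma pmsNatBody_cons (lines : List String) (i : Nat) (rest : List Nat) :
    pmsNatBody lines (i :: rest) =
      (PySem.Str.strip (lines.getD i ""),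
        PySem.Str.join "\n" ((lines.drop (i + 1)).take (rest.headD lines.length - (i + 1))))
        :: pmsNatBody lines rest := by
  cases rest <;> simp [pmsNatBody]

lemma pmsBody_natCast (lines : List String) (js : List Nat) :
    pmsBody lines (js.map (fun n : Nat => (n : Int))) = pmsNatBody lines js := by
  induction js with
  | nil => simp [pmsBody, pmsNatBody]
  | cons a t ih =>
    rw [List.map_cons, pmsBody_cons, pmsNatBody_cons, ih]
    have hhd : (t.map (fun n : Nat => (n : Int))).headD (lines.length : Int) =
        ((t.headD lines.length : Nat) : Int) := by
      cases t <;> simp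
    have h1 : ((a : Int) + 1) = ((a + 1 : Nat) : Int) := by push_cast; ring
    rw [hhd, h1, PySem.List.slice_natCast, PySem.List.pyGet?_natCast]
    simp [List.getD_eq_getElem?_getD]

lemma pmsNatBody_shift (l : String) (lines : List String) (js : List Nat) :
    pmsNatBody (l :: lines) (js.map (· + 1)) = pmsNatBody lines js := by
  induction js with
  | nil => simp [pmsNatBody]
  | cons a t ih =>
    rw [List.map_cons, pmsNatBody_cons, pmsNatBody_cons, ih]
    have hhd : (t.map (· + 1)).headD (l :: lines).length = t.headD lines.length + 1 := by
      cases t <;> simp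
    have h2 : t.headD lines.length + 1 - (a + 1 + 1) = t.headD lines.length - (a + 1) := by
      omega
    rw [hhd, h2]
    simp [List.getD_eq_getElem?_getD]

lemma pmsNatIdxs_headD_take (ls : List String) :
    ls.take ((pmsNatIdxs ls).headD ls.length) = ls.takeWhile (fun x => !pmsIsHdr x) := by
  induction ls with
  | nil => simp
  | cons l ls ih =>
    by_cases h : pmsIsHdr l
    · simp [pmsNatIdxs, h, List.takeWhile_cons]
    · rw [pmsNatIdxs]
      simp only [h, Bool.false_eq_true, if_false, List.nil_append]
      have hh : ((pmsNatIdxs ls).map (· + 1)).headD (l :: ls).length =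
          (pmsNatIdxs ls).headD ls.length + 1 := by
        cases pmsNatIdxs ls <;> simp
      rw [hh, List.take_succ_cons, ih, List.takeWhile_cons]
      simp [h]

lemma pmsNatBody_eq_groups (lines : List String) :
    pmsNatBody lines (pmsNatIdxs lines) = pmsGroups lines := by
  induction lines with
  | nil => simp [pmsNatBody, pmsNatIdxs, pmsGroups]
  | cons l ls ih =>
    by_cases h : pmsIsHdr l
    · rw [pmsNatIdxs]
      simp only [h, if_true, List.singleton_append]
      rw [pmsNatBody_cons, pmsNatBody_shift, ih]
      have hh : ((pmsNatIdxs ls).map (· + 1)).headD (l :: ls).length =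
          (pmsNatIdxs ls).headD ls.length + 1 := by
        cases pmsNatIdxs ls <;> simp
      have ht : (pmsNatIdxs ls).headD ls.length + 1 - (0 + 1) =
          (pmsNatIdxs ls).headD ls.length := by omega
      rw [pmsGroups, if_pos h, ← pmsGroups_dropWhile ls]
      simp only [hh, ht, List.drop_succ_cons, List.drop_zero, pmsNatIdxs_headD_take,
        List.getD_cons_zero]
    · rw [pmsNatIdxs]
      simp only [h, Bool.false_eq_true, if_false, List.nil_append]
      rw [pmsNatBody_shift, ih, pmsGroups, if_neg h]

-- ===== VERDICT (by name: the statement is the Claim_ definition above) =====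
theorem parse_migration_steps_py_spec : Claim_equal_parse_migration_steps_py := by
  intro s _
  show parse_migration_steps_py s = parse_migration_steps_py_alt s
  rw [parse_migration_steps_py, parse_migration_steps_py_alt]
  rw [pmsLoop_none, pmsIdxs_eq_natCast, pmsBody_natCast, pmsNatBody_eq_groups]
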